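-- pv_equiv track=rewrite | github.com/txomon/abot | slackery/bot.py | get_commands_from_tokens
-- ===== SOURCE A (Python) =====
-- def get_commands_from_tokens(tokens):
--     command = []
--     for token in tokens:
--         if token in ['&&', '\r', ';', '\n', '||', '&']:
--             if command:
--                 yield command, token
--                 command = []
--         else:
--             command.append(token)
-- ===== SOURCE B (Python) =====
-- from itertools import groupby
--
-- SEP = {'&&', '\r', ';', '\n', '||', '&'}
--
--
-- def get_commands_from_tokens(tokens):
--     pending = None
--     for is_sep, grp in groupby(tokens, key=lambda t: t in SEP):
--         if is_sep:
--             if pending: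
--                 yield pending, next(grp)
--                 pending = None
--         else:
--             pending = list(grp)
-- ===== Notes on version B (the rewrite author's own statement) =====
-- stated objective: alternative
-- what changed: Replaces the token-by-token accumulator loop by itertools.groupby: the stream is split into maximal runs of separators/non-separators and each non-separator run is emitted with the first token of the separator run that follows it.
import Mathlib
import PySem

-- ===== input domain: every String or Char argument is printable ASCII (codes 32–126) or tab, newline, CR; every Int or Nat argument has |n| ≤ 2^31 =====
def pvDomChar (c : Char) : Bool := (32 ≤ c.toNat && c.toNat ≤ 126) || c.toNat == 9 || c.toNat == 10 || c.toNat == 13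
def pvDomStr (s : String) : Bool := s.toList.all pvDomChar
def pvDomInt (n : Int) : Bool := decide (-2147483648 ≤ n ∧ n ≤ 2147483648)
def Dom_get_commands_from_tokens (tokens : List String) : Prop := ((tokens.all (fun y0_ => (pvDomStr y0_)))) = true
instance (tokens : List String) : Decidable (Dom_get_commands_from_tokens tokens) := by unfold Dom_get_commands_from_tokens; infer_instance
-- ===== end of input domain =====

-- B replaces A's token-by-token accumulator loop by a groupby decomposition (maximal
-- runs of separators / non-separators); same output, same O(n) cost ("alternative").

-- ===== PORT A =====
-- A: generator; one pass, accumulating `command`, yielding (command, token) at each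
-- separator met with a non-empty command.  Port collects the yields in order.
def pvStepA (s : List String × List (List String × String)) (token : String) :
    List String × List (List String × String) :=
  if token ∈ ["&&", "\r", ";", "\n", "||", "&"] then
    if s.1 ≠ [] then ([], s.2 ++ [(s.1, token)]) else s
  else (s.1 ++ [token], s.2)

def get_commands_from_tokens (tokens : List String) : List (List String × String) :=
  (tokens.foldl pvStepA ([], [])).2

-- ===== PORT B =====
def pvIsSep (t : String) : Bool := t ∈ ["&&", "\r", ";", "\n", "||", "&"]

-- transliteration of itertools.groupby(tokens, key=pvIsSep): maximal runs of equal key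
def pvRuns (l : List String) : List (List String) :=
  match l with
  | [] => []
  | x :: xs =>
    (x :: xs.takeWhile (fun t => pvIsSep t == pvIsSep x)) ::
      pvRuns (xs.dropWhile (fun t => pvIsSep t == pvIsSep x))
termination_by l.length
decreasing_by
  simpa using Nat.lt_succ_of_le (List.length_dropWhile_le _ xs)

-- loop body of Source B: pending command (Option) and the yields so far
def pvStepB (s : Option (List String) × List (List String × String)) (grp : List String) :
    Option (List String) × List (List String × String) :=
  match grp with
  | [] => s
  | h :: _ =>
    if pvIsSep h then
      match s.1 with
      | some cmd => (none, s.2 ++ [(cmd, h)])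
      | none => s
    else (some grp, s.2)

def get_commands_from_tokens_alt (tokens : List String) : List (List String × String) :=
  ((pvRuns tokens).foldl pvStepB (none, [])).2

-- ===== PRECONDITION & SPEC =====
def Spec_get_commands_from_tokens (tokens : List String) (out : List (List String × String)) : Prop := out = get_commands_from_tokens_alt tokens
instance (tokens : List String) (out : List (List String × String)) : Decidable (Spec_get_commands_from_tokens tokens out) := by unfold Spec_get_commands_from_tokens; infer_instance

-- ===== CLAIM (what is proved, stated in full; the proofs are below) =====
def Claim_equal_get_commands_from_tokens : Prop := ∀ (tokens : List String), Dom_get_commands_from_tokens tokens → Spec_get_commands_from_tokens tokens (get_commands_from_tokens tokens)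

-- ===== LEMMAS AND PROOFS =====

-- direct recursive characterisation of the sequence of yields, given the pending command
def pvSpecRec : List String → List String → List (List String × String)
  | [], _ => []
  | t :: ts, cmd =>
    if pvIsSep t then
      (if cmd = [] then pvSpecRec ts [] else (cmd, t) :: pvSpecRec ts [])
    else pvSpecRec ts (cmd ++ [t])

theorem pvA_spec (tokens : List String) : ∀ (cmd : List String) (out : List (List String × String)),
    (tokens.foldl pvStepA (cmd, out)).2 = out ++ pvSpecRec tokens cmd := by
  induction tokens with
  | nil => intro cmd out; simp [pvSpecRec]
  | cons t ts ih =>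
    intro cmd out
    simp only [List.foldl_cons, pvStepA, pvSpecRec]
    by_cases hs : t ∈ ["&&", "\r", ";", "\n", "||", "&"]
    · have hs' : pvIsSep t = true := by simp [pvIsSep, hs]
      by_cases hc : cmd = []
      · simp [hs, hs', hc, ih]
      · simp [hs, hs', hc, ih]
    · have hs' : pvIsSep t = false := by
        have h2 := hs; simp at h2; simp [pvIsSep, h2]
      simp [hs, hs', ih]

theorem pvSpecRec_nonsep (run : List String) (h : ∀ t ∈ run, pvIsSep t = false) :
    ∀ (rest cmd : List String), pvSpecRec (run ++ rest) cmd = pvSpecRec rest (cmd ++ run) := by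
  induction run with
  | nil => intro rest cmd; simp
  | cons x xs ih =>
    intro rest cmd
    have hx : pvIsSep x = false := h x (by simp)
    rw [List.cons_append, show pvSpecRec (x :: (xs ++ rest)) cmd
        = pvSpecRec (xs ++ rest) (cmd ++ [x]) by simp [pvSpecRec, hx]]
    rw [ih (fun t ht => h t (by simp [ht])) rest (cmd ++ [x])]
    simp

theorem pvSpecRec_sep_empty (run : List String) (h : ∀ t ∈ run, pvIsSep t = true) :
    ∀ (rest : List String), pvSpecRec (run ++ rest) [] = pvSpecRec rest [] := by
  induction run with
  | nil => simp
  | cons x xs ih =>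
    intro rest
    have hx : pvIsSep x = true := h x (by simp)
    rw [List.cons_append, show pvSpecRec (x :: (xs ++ rest)) []
        = pvSpecRec (xs ++ rest) [] by simp [pvSpecRec, hx]]
    exact ih (fun t ht => h t (by simp [ht])) rest

-- B's fold over the runs computes pvSpecRec, provided pending is nonempty and only
-- set when the next token (if any) is a separator — the invariant groupby maintains.
theorem pvB_spec (n : Nat) : ∀ (tokens : List String), tokens.length ≤ n →
    ∀ (p : Option (List String)) (out : List (List String × String)),
    (∀ cmd, p = some cmd → cmd ≠ [] ∧ ∀ t ∈ tokens.head?, pvIsSep t = true) →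
    ((pvRuns tokens).foldl pvStepB (p, out)).2
      = out ++ pvSpecRec tokens (p.getD []) := by
  induction n with
  | zero =>
    intro tokens hlen p out _
    have h0 : tokens = [] := List.eq_nil_of_length_eq_zero (Nat.le_zero.mp hlen)
    subst h0; simp [pvRuns, pvSpecRec]
  | succ n ih =>
    intro tokens hlen p out hinv
    match tokens with
    | [] => simp [pvRuns, pvSpecRec]
    | x :: xs =>
      rw [pvRuns]
      set q := fun t => pvIsSep t == pvIsSep x with hq
      have hsplit : xs.takeWhile q ++ xs.dropWhile q = xs := List.takeWhile_append_dropWhile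
      have htk : ∀ t ∈ xs.takeWhile q, pvIsSep t = pvIsSep x := by
        intro t ht
        have := List.mem_takeWhile_imp ht
        simpa [hq] using this
      have hlen' : (xs.dropWhile q).length ≤ n := by
        have h1 : (xs.dropWhile q).length ≤ xs.length := List.length_dropWhile_le q xs
        simp at hlen; omega
      have hdropHead : ∀ t ∈ (xs.dropWhile q).head?, pvIsSep t = !(pvIsSep x) := by
        intro t ht
        have hh := List.head?_dropWhile_not q xs
        match hdw : (xs.dropWhile q).head? with
        | none => simp [hdw] at ht
        | some u =>
          rw [hdw] at ht hh
          simp at ht hh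
          simp [hq] at hh
          rw [← ht]
          cases h1 : pvIsSep x <;> simp_all
      simp only [List.foldl_cons]
      by_cases hx : pvIsSep x = true
      · -- separator run: every token of x :: takeWhile is a separator
        have hxs : ∀ t ∈ xs.takeWhile q, pvIsSep t = true := fun t ht => (htk t ht).trans hx
        have hspecxs : pvSpecRec xs [] = pvSpecRec (xs.dropWhile q) [] := by
          conv_lhs => rw [← hsplit]
          exact pvSpecRec_sep_empty _ hxs _
        match p with
        | some cmd =>
          obtain ⟨hne, -⟩ := hinv cmd rfl
          have hstep : pvStepB (some cmd, out) (x :: xs.takeWhile q) = (none, out ++ [(cmd, x)]) := by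
            simp [pvStepB, hx]
          rw [hstep, ih _ hlen' none (out ++ [(cmd, x)]) (by simp)]
          simp [pvSpecRec, hx, hne, hspecxs]
        | none =>
          have hstep : pvStepB (none, out) (x :: xs.takeWhile q) = (none, out) := by
            simp [pvStepB, hx]
          rw [hstep, ih _ hlen' none out (by simp)]
          simp [pvSpecRec, hx, hspecxs]
      · -- non-separator run: invariant forces p = none
        have hp : p = none := by
          match p with
          | none => rfl
          | some cmd =>
            obtain ⟨-, hhd⟩ := hinv cmd rfl
            exact absurd (hhd x (by simp)) hx
        subst hp
        have hxb : pvIsSep x = false := by simpa using hx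
        have hxs : ∀ t ∈ x :: xs.takeWhile q, pvIsSep t = false := by
          intro t ht
          rcases List.mem_cons.mp ht with h | h
          · subst h; exact hxb
          · rw [htk t h]; exact hxb
        have hstep : pvStepB (none, out) (x :: xs.takeWhile q) = (some (x :: xs.takeWhile q), out) := by
          simp [pvStepB, hxb]
        rw [hstep, ih _ hlen' (some (x :: xs.takeWhile q)) out ?_]
        · have : pvSpecRec (x :: xs) [] = pvSpecRec (xs.dropWhile q) (x :: xs.takeWhile q) := by
            conv_lhs => rw [show x :: xs = (x :: xs.takeWhile q) ++ xs.dropWhile q by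
              simp [hsplit]]
            simpa using pvSpecRec_nonsep _ hxs (xs.dropWhile q) []
          simp [this]
        · intro cmd hcmd
          cases hcmd
          refine ⟨by simp, ?_⟩
          intro t ht
          have := hdropHead t ht
          simp [hxb] at this
          exact this

-- ===== VERDICT (by name: the statement is the Claim_ definition above) =====
theorem get_commands_from_tokens_spec : Claim_equal_get_commands_from_tokens := by
  intro tokens _
  unfold Spec_get_commands_from_tokens get_commands_from_tokens get_commands_from_tokens_alt
  rw [pvA_spec tokens [] [], pvB_spec tokens.length tokens le_rfl none [] (by simp)]
  simp
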